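-- pv_equiv track=rewrite | github.com/fairdataihub/SODA-for-SPARC-Validation-Server | validate.py | parse
-- ===== SOURCE A (Python) =====
-- import copy
--
-- def parse(error_path_report):
--
--   user_errors = copy.deepcopy(error_path_report)
--
--   keys = error_path_report.keys()
--
--   # go through all paths and store the paths with the longest subpaths for each base
--   # also store matching subpath lengths together
--   for k in keys:
--     prefix = get_path_prefix(k)
--
--     # check if the current path has inputs as a substring
--     if prefix.find("inputs") != -1:
--       # as per Tom ignore inputs paths' so
--       # remove the given prefix with 'inputs' in its path
--       del user_errors[k]
--       continue
--
--     # check for a suffix indicator in the prefix (aka a forward slash at the end of the prefix)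
--     if prefix[-1] == "/":
--       # if so remove the suffix and check if the resulting prefix is an existing path key
--       # indicating it can be removed from the errors_for_users dictionary as the current path
--       # will be an error in its subpath -- as stated in the function comment we avoid these errors
--       prefix_no_suffix_indicator = prefix[0 : len(prefix) - 1]
--
--       if prefix_no_suffix_indicator in user_errors:
--         del user_errors[prefix_no_suffix_indicator]
--
--
--
--   return user_errors
--
-- def get_path_prefix(path):
--   if path.count('/') == 1:
--     # get the entire path as the "prefix" and return it
--     return path
--   # get the path up to the final "/" and return it as the prefix
--   final_slash_idx = path.rfind("/")
--   return path[:final_slash_idx + 1]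
-- ===== SOURCE B (Python) =====
-- import copy
--
-- def parse(error_path_report):
--     # Declarative characterization: a key survives iff its prefix lacks 'inputs'
--     # and it is not the parent of some surviving key.
--     def pre(p):
--         return p if p.count('/') == 1 else p[:p.rfind('/') + 1]
--     live = {k for k in error_path_report if 'inputs' not in pre(k)}
--     parents = {pre(k)[:-1] for k in live if pre(k)[-1] == '/'}
--     return {k: copy.deepcopy(v) for k, v in error_path_report.items()
--             if k in live and k not in parents}
-- ===== Notes on version B (the rewrite author's own statement) =====
-- stated objective: alternative
-- what changed: B replaces A's sequential mutate-a-deepcopy loop (per-key branches deleting from the shrinking copy) by a declarative characterization: a key survives iff its prefix lacks 'inputs' and it is not in the set of parents of surviving keys, computed by two set comprehensions and one rebuild comprehension.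
import Mathlib
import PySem

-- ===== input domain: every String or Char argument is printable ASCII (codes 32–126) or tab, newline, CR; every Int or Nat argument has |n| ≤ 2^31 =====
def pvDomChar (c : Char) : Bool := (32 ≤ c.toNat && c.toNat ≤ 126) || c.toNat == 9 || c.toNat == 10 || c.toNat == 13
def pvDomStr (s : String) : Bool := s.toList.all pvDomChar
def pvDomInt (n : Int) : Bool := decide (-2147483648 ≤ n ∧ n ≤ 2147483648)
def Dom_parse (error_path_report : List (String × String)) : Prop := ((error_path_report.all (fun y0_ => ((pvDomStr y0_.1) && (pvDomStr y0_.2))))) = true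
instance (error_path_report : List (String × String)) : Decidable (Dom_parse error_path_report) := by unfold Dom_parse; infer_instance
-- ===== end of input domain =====

-- B replaces A's sequential delete-from-a-deepcopy loop by a declarative characterization
-- (a key survives iff its prefix lacks 'inputs' and it is not a parent of a surviving key),
-- built from two set comprehensions and a rebuild (objective: alternative decomposition).
-- The dict argument is modelled as an association list via PySem.Dict.ofList; neither program mutates its argument.

-- ===== PORT A =====
def getPathPrefix (path : String) : String :=
  if PySem.Str.count path "/" = 1 then path
  else PySem.Str.slice path none (some (PySem.Str.rfind path "/" + 1))

def parseStepA (userErrors : PySem.Dict String String) (k : String) :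
    PySem.Dict String String :=
  let pfx := getPathPrefix k
  if PySem.Str.find pfx "inputs" ≠ -1 then userErrors.erase k
  else
    match PySem.Str.pyGet? pfx (-1) with
    | none => userErrors   -- Python raises IndexError here; excluded by Pre_parse
    | some c =>
      if c = '/' then
        let parent := PySem.Str.slice pfx (some 0) (some ((PySem.Str.len pfx : Int) - 1))
        if userErrors.contains parent then userErrors.erase parent else userErrors
      else userErrors

def parse (error_path_report : List (String × String)) : List (String × String) :=
  let d := PySem.Dict.ofList error_path_report
  (d.keys.foldl parseStepA d).items

-- ===== PORT B =====
def preB (p : String) : String :=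
  if PySem.Str.count p "/" = 1 then p
  else PySem.Str.slice p none (some (PySem.Str.rfind p "/" + 1))

def parse_alt (error_path_report : List (String × String)) : List (String × String) :=
  let d := PySem.Dict.ofList error_path_report
  let live : PySem.Set String :=
    PySem.Set.ofList (d.keys.filter (fun k => !(PySem.Str.isIn "inputs" (preB k))))
  let parents : PySem.Set String :=
    -- Python's pre(k)[-1] == '/' raises IndexError on an empty prefix (excluded by Pre_parse); pyGet? is none there
    PySem.Set.ofList ((live.filter (fun k => PySem.Str.pyGet? (preB k) (-1) == some '/')).map
      (fun k => PySem.Str.slice (preB k) none (some (-1))))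
  d.items.filter (fun p => PySem.Set.contains live p.1 && !(PySem.Set.contains parents p.1))

-- ===== PRECONDITION & SPEC =====
-- Pre_parse excludes exactly the inputs on which the Python A raises IndexError:
-- a key that contains no '/' yields an empty prefix, so prefix[-1] fails (B's pre(k)[-1] fails there too).
def Pre_parse (error_path_report : List (String × String)) : Prop :=
  ∀ p ∈ error_path_report, PySem.Str.isIn "/" p.1 = true
instance (error_path_report : List (String × String)) : Decidable (Pre_parse error_path_report) := by unfold Pre_parse; infer_instance

def pvWitness_parse : (List (String × String)) :=
  [("a/b", "e1"), ("a/", "e2"), ("x/inputs/y", "e3")]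

def Spec_parse (error_path_report : List (String × String)) (out : List (String × String)) : Prop := out = parse_alt error_path_report
instance (error_path_report : List (String × String)) (out : List (String × String)) : Decidable (Spec_parse error_path_report out) := by unfold Spec_parse; infer_instance

-- ===== CLAIM (what is proved, stated in full; the proofs are below) =====
def Claim_equal_parse : Prop := ∀ (error_path_report : List (String × String)), Dom_parse error_path_report → Pre_parse error_path_report → Spec_parse error_path_report (parse error_path_report)


-- ===== LEMMAS AND PROOFS =====

-- the declarative removal predicate after processing the keys in p:
-- x was deleted for its own 'inputs' prefix, or as the parent of some processed key
def remB (p : List String) (x : String) : Bool :=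
  (decide (x ∈ p) && PySem.Str.isIn "inputs" (getPathPrefix x)) ||
  p.any (fun k => !(PySem.Str.isIn "inputs" (getPathPrefix k)) &&
    PySem.Str.endswith (getPathPrefix k) "/" &&
    decide (x = PySem.Str.slice (getPathPrefix k) none (some (-1))))

-- s.endswith('/') means the last character is '/'
lemma endswith_getLast (s : String) :
    PySem.Str.endswith s "/" = true ↔ s.toList.getLast? = some '/' := by
  rw [PySem.Str.endswith_eq, PySem.Chars.endswith_iff]
  show ['/'] <:+ s.toList ↔ _
  constructor
  · rintro ⟨t, ht⟩; rw [← ht]; simp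
  · intro h
    obtain ⟨t, ht⟩ := List.getLast?_eq_some_iff.mp h
    exact ⟨t, ht.symm⟩

-- s[-1] is the last character
lemma pyget_neg_one (s : String) :
    PySem.Str.pyGet? s (-1) = s.toList.getLast? := by
  rw [PySem.Str.pyGet?_eq, PySem.Chars.pyGet?_eq_listPyGet?, PySem.List.pyGet?_neg_one]

-- B's last-character test pre(k)[-1] == '/' is the endswith('/') test (none compares unequal)
lemma pyget_slash_eq_endswith (s : String) :
    (PySem.Str.pyGet? s (-1) == some '/') = PySem.Str.endswith s "/" := by
  rw [Bool.eq_iff_iff, beq_iff_eq, pyget_neg_one, endswith_getLast]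

-- A's slice prefix[0 : len(prefix)-1] equals B's prefix[:-1] on a nonempty string.
lemma slice_parent_eq (s : String) (h : s.toList ≠ []) :
    PySem.Str.slice s (some 0) (some ((PySem.Str.len s : Int) - 1)) =
      PySem.Str.slice s none (some (-1)) := by
  apply String.toList_inj.mp
  rw [PySem.Str.slice_to_neg_one, PySem.Str.toList_slice, PySem.Chars.slice_eq_listSlice]
  have hlen : 1 ≤ s.toList.length := by
    cases hs : s.toList with
    | nil => exact absurd hs h
    | cons a l => simp
  have hcast : ((PySem.Str.len s : Int) - 1) = ((s.toList.length - 1 : Nat) : Int) := by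
    rw [PySem.Str.len_eq]; omega
  have h0 : ((0 : Int)) = ((0 : Nat) : Int) := rfl
  rw [hcast, h0, PySem.List.slice_natCast]
  simp [List.dropLast_eq_take]

-- two key-filters of d.items agree when the predicates agree on d.keys
lemma filter_keys_congr (d : PySem.Dict String String) (f g : String → Bool)
    (h : ∀ x ∈ d.keys, f x = g x) :
    d.items.filter (fun q => !(f q.1)) = d.items.filter (fun q => !(g q.1)) := by
  apply List.filter_congr
  intro q hq
  rw [h q.1 (List.mem_map.mpr ⟨q, hq, rfl⟩)]

-- a key is in S exactly when it is a key of d not yet removed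
lemma contains_S_iff (d S : PySem.Dict String String) (f : String → Bool) (x : String)
    (h : S.items = d.items.filter (fun q => !(f q.1))) :
    S.contains x = true ↔ (x ∈ d.keys ∧ f x = false) := by
  rw [PySem.Dict.contains_eq_decide_mem_keys, decide_eq_true_iff]
  show x ∈ S.items.map Prod.fst ↔ _
  rw [h]
  constructor
  · intro hx
    obtain ⟨q, hq, hqx⟩ := List.mem_map.mp hx
    obtain ⟨hqd, hqf⟩ := List.mem_filter.mp hq
    subst hqx
    exact ⟨List.mem_map.mpr ⟨q, hqd, rfl⟩, by simpa using hqf⟩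
  · rintro ⟨hx, hf⟩
    obtain ⟨q, hqd, hqx⟩ := List.mem_map.mp hx
    refine List.mem_map.mpr ⟨q, List.mem_filter.mpr ⟨hqd, ?_⟩, hqx⟩
    rw [hqx, hf]; rfl

-- erasing a key from a dict whose items are a key-filtered sublist, as one filter
lemma erase_filter (d S : PySem.Dict String String) (f g : String → Bool) (y : String)
    (h : S.items = d.items.filter (fun q => !(f q.1)))
    (hg : ∀ x, g x = (f x || decide (x = y))) :
    (S.erase y).items = d.items.filter (fun q => !(g q.1)) := by
  show (S.items.filter (fun q => !(q.1 == y))) = _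
  rw [h, List.filter_filter]
  apply List.filter_congr
  intro q _
  rw [hg]
  by_cases hqy : q.1 = y <;> simp [hqy]

-- remB after one more processed key, branch: 'inputs' in the prefix
lemma remB_append_inputs (p : List String) (k x : String)
    (hin : PySem.Str.isIn "inputs" (getPathPrefix k) = true) :
    remB (p ++ [k]) x = (remB p x || decide (x = k)) := by
  have hin' : PySem.Chars.isIn ['i', 'n', 'p', 'u', 't', 's'] (getPathPrefix k).toList = true := by
    simpa using hin
  by_cases hxk : x = k <;>
    simp [remB, hxk, hin', List.any_append]

-- branch: no 'inputs', prefix ends in '/'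
lemma remB_append_parent (p : List String) (k x : String)
    (hin : PySem.Str.isIn "inputs" (getPathPrefix k) = false)
    (hsl : PySem.Str.endswith (getPathPrefix k) "/" = true) :
    remB (p ++ [k]) x =
      (remB p x || decide (x = PySem.Str.slice (getPathPrefix k) none (some (-1)))) := by
  have hin' : PySem.Chars.isIn ['i', 'n', 'p', 'u', 't', 's'] (getPathPrefix k).toList = false := by
    simpa using hin
  have hsl' : PySem.Chars.endswith (getPathPrefix k).toList ['/'] = true := by
    simpa using hsl
  by_cases hxk : x = k <;>
    simp [remB, hxk, hin', hsl', List.any_append, Bool.or_assoc]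

-- branch: no 'inputs', prefix does not end in '/'
lemma remB_append_skip (p : List String) (k x : String)
    (hin : PySem.Str.isIn "inputs" (getPathPrefix k) = false)
    (hsl : PySem.Str.endswith (getPathPrefix k) "/" = false) :
    remB (p ++ [k]) x = remB p x := by
  have hin' : PySem.Chars.isIn ['i', 'n', 'p', 'u', 't', 's'] (getPathPrefix k).toList = false := by
    simpa using hin
  have hsl' : PySem.Chars.endswith (getPathPrefix k).toList ['/'] = false := by
    simpa using hsl
  by_cases hxk : x = k <;>
    simp [remB, hxk, hin', hsl', List.any_append]

-- one loop step of A preserves the filter characterization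
lemma step_inv (d S : PySem.Dict String String) (p : List String) (k : String)
    (h : S.items = d.items.filter (fun q => !(remB p q.1))) :
    (parseStepA S k).items = d.items.filter (fun q => !(remB (p ++ [k]) q.1)) := by
  unfold parseStepA
  by_cases hin : PySem.Str.find (getPathPrefix k) "inputs" ≠ -1
  · have hB : PySem.Str.isIn "inputs" (getPathPrefix k) = true :=
      (PySem.Str.isIn_iff_infix _ _).mpr ((PySem.Str.find_ne_neg_one_iff _ _).mp hin)
    rw [if_pos hin]
    exact erase_filter d S _ _ k h (fun x => remB_append_inputs p k x hB)
  · have hB : PySem.Str.isIn "inputs" (getPathPrefix k) = false := by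
      rw [Bool.eq_false_iff]
      intro hc
      exact hin ((PySem.Str.find_ne_neg_one_iff _ _).mpr ((PySem.Str.isIn_iff_infix _ _).mp hc))
    rw [if_neg hin]
    rw [pyget_neg_one]
    cases hlast : (getPathPrefix k).toList.getLast? with
    | none =>
      have hsl : PySem.Str.endswith (getPathPrefix k) "/" = false := by
        rw [Bool.eq_false_iff]
        intro hc
        rw [(endswith_getLast _).mp hc] at hlast
        exact Option.some_ne_none _ hlast
      rw [h]
      exact (filter_keys_congr d _ _ (fun x _ => (remB_append_skip p k x hB hsl).symm))
    | some c =>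
      by_cases hc : c = '/'
      · subst hc
        have hsl : PySem.Str.endswith (getPathPrefix k) "/" = true :=
          (endswith_getLast _).mpr hlast
        have hne : (getPathPrefix k).toList ≠ [] := by
          intro hnil; rw [List.getLast?_eq_none_iff.mpr hnil] at hlast; cases hlast
        dsimp only
        rw [if_pos rfl, slice_parent_eq _ hne]
        by_cases hS : S.contains (PySem.Str.slice (getPathPrefix k) none (some (-1))) = true
        · rw [if_pos hS]
          exact erase_filter d S _ _ _ h (fun x => remB_append_parent p k x hB hsl)
        · rw [if_neg (by simpa using hS)]
          rw [Bool.not_eq_true] at hS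
          rw [h]
          refine filter_keys_congr d _ _ (fun x hx => ?_)
          rw [remB_append_parent p k x hB hsl]
          by_cases hxp : x = PySem.Str.slice (getPathPrefix k) none (some (-1))
          · have hnot : ¬ (x ∈ d.keys ∧ remB p x = false) := by
              intro hcontr
              rw [← hxp] at hS
              rw [(contains_S_iff d S _ x h).mpr hcontr] at hS
              cases hS
            have hrem : remB p x = true := by
              rcases Bool.eq_false_or_eq_true (remB p x) with hT | hF
              · exact hT
              · exact absurd ⟨hx, hF⟩ hnot
            simp [hrem]
          · simp [hxp]
      · dsimp only
        rw [if_neg hc]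
        have hsl : PySem.Str.endswith (getPathPrefix k) "/" = false := by
          rw [Bool.eq_false_iff]
          intro hE
          rw [(endswith_getLast _).mp hE] at hlast
          exact hc (Option.some.inj hlast).symm
        rw [h]
        exact (filter_keys_congr d _ _ (fun x _ => (remB_append_skip p k x hB hsl).symm))

-- folding the whole key list yields the filter by the full removal predicate
lemma fold_inv (d : PySem.Dict String String) :
    ∀ (l : List String) (S : PySem.Dict String String) (p : List String),
      S.items = d.items.filter (fun q => !(remB p q.1)) →
      (l.foldl parseStepA S).items =
        d.items.filter (fun q => !(remB (p ++ l) q.1)) := by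
  intro l
  induction l with
  | nil => intro S p h; simpa using h
  | cons k l ih =>
    intro S p h
    have := ih (parseStepA S k) (p ++ [k]) (step_inv d S p k h)
    simpa using this

-- the full removal predicate is the complement of B's keep condition, on keys of d
lemma remB_keys_eq_alt (d : PySem.Dict String String) (x : String) (hx : x ∈ d.keys) :
    (!(remB d.keys x)) =
      (PySem.Set.contains (PySem.Set.ofList (d.keys.filter (fun k => !(PySem.Str.isIn "inputs" (preB k))))) x &&
       !(PySem.Set.contains (PySem.Set.ofList
          (((PySem.Set.ofList (d.keys.filter (fun k => !(PySem.Str.isIn "inputs" (preB k))))).filter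
              (fun k => PySem.Str.pyGet? (preB k) (-1) == some '/')).map
            (fun k => PySem.Str.slice (preB k) none (some (-1))))) x)) := by
  have hpre : preB = getPathPrefix := rfl
  rw [hpre, Bool.eq_iff_iff]
  simp only [pyget_slash_eq_endswith]
  by_cases hI : PySem.Str.isIn "inputs" (getPathPrefix x) = true
  · have hI' : PySem.Chars.isIn ['i', 'n', 'p', 'u', 't', 's'] (getPathPrefix x).toList = true := by
      simpa using hI
    simp [remB, hI', hx]
  · rw [Bool.not_eq_true] at hI
    simp only [remB, PySem.Set.contains_eq_listContains, List.contains_eq_mem,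
      Bool.eq_false_iff, ne_eq, Bool.or_eq_true, Bool.and_eq_true, Bool.not_eq_true',
      decide_eq_true_iff, List.any_eq_true, PySem.Set.mem_ofList, List.mem_filter,
      List.mem_map, hI, hx]
    simp only [Bool.false_eq_true, false_or, and_true, true_and]
    constructor
    · rintro h ⟨a, ⟨⟨ha, haI⟩, haE⟩, hax⟩
      exact h ⟨a, ha, ⟨haI, haE⟩, hax.symm⟩
    · rintro h ⟨a, ha, ⟨haI, haE⟩, hax⟩
      exact h ⟨a, ⟨⟨ha, haI⟩, haE⟩, hax.symm⟩

-- ===== VERDICT (by name: the statement is the Claim_ definition above) =====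
theorem parse_spec : Claim_equal_parse := by
  intro l _ _
  show parse l = parse_alt l
  unfold parse parse_alt
  set d := PySem.Dict.ofList l with hd
  have h0 : d.items = d.items.filter (fun q => !(remB [] q.1)) := by
    simp [remB]
  have hfold := fold_inv d d.keys d [] h0
  simp only [List.nil_append] at hfold
  rw [hfold]
  exact List.filter_congr (fun q hq =>
    remB_keys_eq_alt d q.1 (List.mem_map.mpr ⟨q, hq, rfl⟩))
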